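-- pv_equiv track=rewrite | github.com/rosswolf/Tourbillon | elastic-app/app/check_type_safety.py | _is_in_string_or_comment
-- ===== SOURCE A (Python) =====
-- def _is_in_string_or_comment(line: str, text: str) -> bool:
--     """Check if text appears inside a string or comment in the line."""
--     # Simple heuristic - check if text appears after # or inside quotes
--     comment_pos = line.find('#')
--     text_pos = line.find(text)
--
--     if comment_pos != -1 and text_pos > comment_pos:
--         return True
--
--     # Check for strings (simplified - doesn't handle all cases)
--     in_string = False
--     quote_char = None
--     for i, char in enumerate(line):
--         if char in ['"', "'"]:
--             if not in_string:
--                 in_string = True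
--                 quote_char = char
--             elif char == quote_char:
--                 in_string = False
--                 quote_char = None
--         elif line[i:i+len(text)] == text and in_string:
--             return True
--
--     return False
-- ===== SOURCE B (Python) =====
-- def _is_in_string_or_comment(line: str, text: str) -> bool:
--     """Check if text appears inside a string or comment in the line."""
--     comment_pos = line.find('#')
--     text_pos = line.find(text)
--     if comment_pos != -1 and text_pos > comment_pos:
--         return True
--     # Pass 1: mask[i] = in-string state when reaching index i (same toggle logic).
--     mask = []
--     in_string = False
--     quote_char = None
--     for ch in line:
--         mask.append(in_string)
--         if ch in ('"', "'"):
--             if not in_string: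
--                 in_string = True
--                 quote_char = ch
--             elif ch == quote_char:
--                 in_string = False
--                 quote_char = None
--     # Pass 2: jump between occurrences of text with str.find.
--     n = len(line)
--     start = 0
--     while start <= n:
--         i = line.find(text, start)
--         if i == -1:
--             break
--         if i < n and mask[i] and line[i] not in ('"', "'"):
--             return True
--         start = i + 1
--     return False
-- ===== Notes on version B (the rewrite author's own statement) =====
-- stated objective: faster
-- what changed: Replaces A's single fused scan, which compares a fresh slice against text at every non-quote index, by two passes: one pass precomputes a boolean in-string mask, then str.find jumps directly between occurrences of text and each hit is checked against the mask and the quote-start skip.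
import Mathlib
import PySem

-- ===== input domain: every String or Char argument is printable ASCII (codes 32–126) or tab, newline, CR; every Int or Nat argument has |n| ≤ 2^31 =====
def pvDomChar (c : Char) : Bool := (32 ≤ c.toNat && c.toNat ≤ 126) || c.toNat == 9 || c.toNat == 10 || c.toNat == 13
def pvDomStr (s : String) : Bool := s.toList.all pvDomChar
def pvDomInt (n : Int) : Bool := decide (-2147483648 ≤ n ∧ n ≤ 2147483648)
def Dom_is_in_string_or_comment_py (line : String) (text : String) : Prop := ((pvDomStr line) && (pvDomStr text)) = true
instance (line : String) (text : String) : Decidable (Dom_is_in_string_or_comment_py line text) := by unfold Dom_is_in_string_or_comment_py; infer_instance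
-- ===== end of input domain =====

-- B replaces A's single fused scan (slice test at every non-quote index) by two passes:
-- a precomputed in-string mask, then str.find jumps between occurrences of text (measured faster in a timing run).

-- ===== PORT A =====
def pvIsQuote (c : Char) : Bool := c == '"' || c == '\''

-- the for-loop of A: rest = remaining chars, i = current index, (inStr, qc) = loop state
def pvALoop (l t : List Char) : List Char → Nat → Bool → Option Char → Bool
  | [], _, _, _ => false
  | c :: rest, i, inStr, qc =>
    if pvIsQuote c then
      if !inStr then pvALoop l t rest (i+1) true (some c)
      else if some c == qc then pvALoop l t rest (i+1) false none
      else pvALoop l t rest (i+1) inStr qc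
    else if (PySem.List.slice l (some (i : Int)) (some ((i : Int) + (t.length : Int))) == t) && inStr then true
    else pvALoop l t rest (i+1) inStr qc

def is_in_string_or_comment_py (line : String) (text : String) : Bool :=
  let comment_pos := PySem.Str.find line "#"
  let text_pos := PySem.Str.find line text
  if comment_pos != -1 && decide (text_pos > comment_pos) then true
  else pvALoop line.toList text.toList line.toList 0 false none

-- ===== PORT B =====
-- pass 1 of Source B: mask[i] = in-string state on reaching index i
def pvMask : List Char → Bool → Option Char → List Bool
  | [], _, _ => []
  | c :: rest, inStr, qc =>
    inStr ::
      (if pvIsQuote c then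
        if !inStr then pvMask rest true (some c)
        else if some c == qc then pvMask rest false none
        else pvMask rest inStr qc
      else pvMask rest inStr qc)

-- pass 2 of Source B: the while loop jumping with line.find(text, start); fuel bounds the iterations
def pvBLoop (line text : String) (mask : List Bool) : Nat → Nat → Bool
  | 0, _ => false
  | fuel+1, start =>
    if start ≤ line.toList.length then
      -- i := line.find(text, start)
      if PySem.Str.findFrom line text (start : Int) == -1 then false
      else if decide (PySem.Str.findFrom line text (start : Int) < (line.toList.length : Int))
              && mask.getD (PySem.Str.findFrom line text (start : Int)).toNat false
              && !pvIsQuote (line.toList.getD (PySem.Str.findFrom line text (start : Int)).toNat ' ') then true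
      else pvBLoop line text mask fuel ((PySem.Str.findFrom line text (start : Int)).toNat + 1)
    else false

def is_in_string_or_comment_py_alt (line : String) (text : String) : Bool :=
  let comment_pos := PySem.Str.find line "#"
  let text_pos := PySem.Str.find line text
  if comment_pos != -1 && decide (text_pos > comment_pos) then true
  else
    let mask := pvMask line.toList false none
    pvBLoop line text mask (line.toList.length + 2) 0

-- ===== PRECONDITION & SPEC =====
def Spec_is_in_string_or_comment_py (line : String) (text : String) (out : Bool) : Prop := out = is_in_string_or_comment_py_alt line text
instance (line : String) (text : String) (out : Bool) : Decidable (Spec_is_in_string_or_comment_py line text out) := by unfold Spec_is_in_string_or_comment_py; infer_instance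

-- ===== CLAIM (what is proved, stated in full; the proofs are below) =====
def Claim_equal_is_in_string_or_comment_py : Prop := ∀ (line : String) (text : String), Dom_is_in_string_or_comment_py line text → Spec_is_in_string_or_comment_py line text (is_in_string_or_comment_py line text)

-- ===== LEMMAS AND PROOFS =====

-- shared vocabulary for the proof
def pvStep (s : Bool × Option Char) (c : Char) : Bool × Option Char :=
  if pvIsQuote c then
    if !s.1 then (true, some c)
    else if some c == s.2 then (false, none)
    else s
  else s

def pvSt (l : List Char) (i : Nat) : Bool × Option Char := (l.take i).foldl pvStep (false, none)

def pvMatch (l t : List Char) (i : Nat) : Bool := (l.drop i).take t.length == t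

def pvCond (l t : List Char) (i : Nat) : Bool :=
  pvMatch l t i && !pvIsQuote (l.getD i ' ') && (pvSt l i).1

-- "a hit exists at some index in [i, i+k)"
def pvHit (l t : List Char) : Nat → Nat → Bool
  | _, 0 => false
  | i, k+1 => pvCond l t i || pvHit l t (i+1) k

theorem pvSt_succ (l : List Char) (i : Nat) (h : i < l.length) :
    pvSt l (i+1) = pvStep (pvSt l i) (l[i]) := by
  unfold pvSt
  have h1 : l.take (i+1) = l.take i ++ [l[i]] := by
    rw [List.take_add_one, List.getElem?_eq_getElem h]; rfl
  rw [h1, List.foldl_append]; rfl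

theorem pvMatch_iff (l t : List Char) (i : Nat) :
    pvMatch l t i = true ↔ t <+: l.drop i := by
  unfold pvMatch
  rw [beq_iff_eq, List.prefix_iff_eq_take]
  exact eq_comm

theorem pvALoop_eq (l t : List Char) : ∀ rest i inStr qc, rest = l.drop i →
    (inStr, qc) = pvSt l i →
    pvALoop l t rest i inStr qc = pvHit l t i rest.length := by
  intro rest
  induction rest with
  | nil => intro i inStr qc _ _; simp [pvALoop, pvHit]
  | cons c rest ih =>
    intro i inStr qc hrest hst
    have hi : i < l.length := by
      by_contra h
      rw [List.drop_eq_nil_of_le (by omega)] at hrest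
      exact absurd hrest (by simp)
    rw [List.drop_eq_getElem_cons hi] at hrest
    have hc : c = l[i] := (List.cons_eq_cons.mp hrest).1
    have hrest' : rest = l.drop (i+1) := (List.cons_eq_cons.mp hrest).2
    have hstep : pvSt l (i+1) = pvStep (inStr, qc) c := by
      rw [pvSt_succ l i hi, ← hst, ← hc]
    have hgetD : l.getD i ' ' = c := by simp [List.getD, List.getElem?_eq_getElem hi, ← hc]
    have hslice : PySem.List.slice l (some (i : Int)) (some ((i : Int) + (t.length : Int)))
        = (l.drop i).take t.length := PySem.List.slice_natCast_add l i t.length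
    have hcond : pvCond l t i = (pvMatch l t i && !pvIsQuote c && inStr) := by
      unfold pvCond; rw [hgetD, ← hst]
    show (if pvIsQuote c then
            if !inStr then pvALoop l t rest (i+1) true (some c)
            else if some c == qc then pvALoop l t rest (i+1) false none
            else pvALoop l t rest (i+1) inStr qc
          else if (PySem.List.slice l (some (i : Int)) (some ((i : Int) + (t.length : Int))) == t) && inStr then true
          else pvALoop l t rest (i+1) inStr qc)
        = (pvCond l t i || pvHit l t (i+1) rest.length)
    rw [hslice, hcond]
    cases hq : pvIsQuote c with
    | true =>
      cases hin : inStr with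
      | false =>
        have hrec : pvALoop l t rest (i+1) true (some c) = pvHit l t (i+1) rest.length :=
          ih _ _ _ hrest' (by rw [hstep, hin, pvStep]; simp [hq])
        simp [hrec]
      | true =>
        cases hqc : (some c == qc) with
        | true =>
          have hrec : pvALoop l t rest (i+1) false none = pvHit l t (i+1) rest.length :=
            ih _ _ _ hrest' (by rw [hstep, hin, pvStep]; simp [hq, hqc])
          simp [hrec]
        | false =>
          have hrec : pvALoop l t rest (i+1) true qc = pvHit l t (i+1) rest.length :=
            ih _ _ _ hrest' (by rw [hstep, hin, pvStep]; simp [hq, hqc])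
          simp [hrec]
    | false =>
      have hrec : pvALoop l t rest (i+1) inStr qc = pvHit l t (i+1) rest.length :=
        ih _ _ _ hrest' (by rw [hstep, pvStep]; simp [hq])
      unfold pvMatch
      cases hm : ((l.drop i).take t.length == t) <;> cases hin : inStr <;>
        simp_all

theorem pvHit_skip (l t : List Char) (m : Nat) : ∀ i, i + m ≤ l.length →
    (∀ j, i ≤ j → j < i + m → pvMatch l t j = false) →
    pvHit l t i (l.length - i) = pvHit l t (i + m) (l.length - (i + m)) := by
  induction m with
  | zero => intro i _ _; simp
  | succ m ih =>
    intro i hm hnone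
    have hi : i < l.length := by omega
    have h1 : l.length - i = (l.length - (i+1)) + 1 := by omega
    rw [h1]
    have hc : pvCond l t i = false := by
      unfold pvCond
      rw [hnone i le_rfl (by omega)]
      simp
    show (pvCond l t i || pvHit l t (i+1) (l.length - (i+1))) = _
    rw [hc, Bool.false_or]
    have := ih (i+1) (by omega) (fun j hj1 hj2 => hnone j (by omega) (by omega))
    rw [this]
    congr 1 <;> omega

-- the mask lists the in-string states
theorem pvMask_getD (l : List Char) : ∀ rest i inStr qc, rest = l.drop i →
    (inStr, qc) = pvSt l i →
    ∀ k, i + k < l.length → (pvMask rest inStr qc).getD k false = (pvSt l (i + k)).1 := by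
  intro rest
  induction rest with
  | nil =>
    intro i inStr qc hrest _ k hk
    exfalso
    have := List.drop_eq_nil_iff.mp hrest.symm
    omega
  | cons c rest ih =>
    intro i inStr qc hrest hst k hk
    have hi : i < l.length := by omega
    rw [List.drop_eq_getElem_cons hi] at hrest
    have hc : c = l[i] := (List.cons_eq_cons.mp hrest).1
    have hrest' : rest = l.drop (i+1) := (List.cons_eq_cons.mp hrest).2
    have hstep : pvSt l (i+1) = pvStep (inStr, qc) c := by
      rw [pvSt_succ l i hi, ← hst, ← hc]
    cases k with
    | zero =>
      show inStr = (pvSt l i).1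
      rw [← hst]
    | succ k =>
      have harith : i + (k + 1) = (i + 1) + k := by omega
      rw [harith]
      show (if pvIsQuote c then
              if !inStr then pvMask rest true (some c)
              else if some c == qc then pvMask rest false none
              else pvMask rest inStr qc
            else pvMask rest inStr qc).getD k false = (pvSt l (i + 1 + k)).1
      cases hq : pvIsQuote c with
      | true =>
        cases hin : inStr with
        | false =>
          simp only [Bool.not_false, if_true]
          exact ih _ _ _ hrest' (by rw [hstep, hin, pvStep]; simp [hq]) k (by omega)
        | true =>
          cases hqc : (some c == qc) with
          | true =>
            simp only [Bool.not_true, Bool.false_eq_true, if_false]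
            exact ih _ _ _ hrest' (by rw [hstep, hin, pvStep]; simp [hq, hqc]) k (by omega)
          | false =>
            simp only [Bool.not_true, Bool.false_eq_true, if_false]
            exact ih _ true qc hrest' (by rw [hstep, hin, pvStep]; simp [hq, hqc]) k (by omega)
      | false =>
        simp only [Bool.false_eq_true, if_false]
        exact ih _ _ _ hrest' (by rw [hstep, pvStep]; simp [hq]) k (by omega)

theorem pvBLoop_out (line text : String) (mask : List Bool) (fuel start : Nat)
    (h : line.toList.length < start) : pvBLoop line text mask fuel start = false := by
  cases fuel with
  | zero => rfl
  | succ f => show (if start ≤ line.toList.length then _ else false) = false; rw [if_neg (by omega)]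

-- B's while loop computes pvHit
theorem pvBLoop_eq (line text : String) :
    ∀ fuel start, start ≤ line.toList.length → line.toList.length + 1 - start < fuel →
    pvBLoop line text (pvMask line.toList false none) fuel start
      = pvHit line.toList text.toList start (line.toList.length - start) := by
  intro fuel
  induction fuel with
  | zero => intro start _ h; omega
  | succ f ih =>
    intro start hstart hfuel
    set l := line.toList with hl
    set t := text.toList with ht
    have hmask : ∀ k, k < l.length → (pvMask l false none).getD k false = (pvSt l k).1 := by
      intro k hk
      have := pvMask_getD l l 0 false none (by simp) (by simp [pvSt]) k (by omega)
      simpa using this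
    show (if start ≤ l.length then _ else false) = _
    rw [if_pos hstart]
    have hff : PySem.Str.findFrom line text (start : Int)
        = PySem.Chars.findFrom l t (start : Int) := by
      simp [hl, ht]
    by_cases hneg : PySem.Str.findFrom line text (start : Int) = -1
    · -- no occurrence at or after start: every pvMatch from start on is false
      have hnoinfix : ¬ t <:+: l.drop start := by
        rw [hff] at hneg
        exact (PySem.Chars.findFrom_natCast_eq_neg_one_iff l t start hstart).mp hneg
      have hnone : ∀ j, start ≤ j → j < l.length → pvMatch l t j = false := by
        intro j hj1 hj2
        by_contra h
        have hmt : pvMatch l t j = true := by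
          cases hb : pvMatch l t j
          · exact absurd hb h
          · rfl
        have hpre : t <+: l.drop j := (pvMatch_iff l t j).mp hmt
        exact hnoinfix (by
          have : l.drop j = (l.drop start).drop (j - start) := by
            rw [List.drop_drop]; congr 1; omega
          rw [this] at hpre
          exact hpre.isInfix.trans (List.drop_suffix _ _).isInfix)
      have := pvHit_skip l t (l.length - start) start (by omega)
        (fun j hj1 hj2 => hnone j hj1 (by omega))
      simp only [hneg]
      rw [this]
      simp [show l.length - (start + (l.length - start)) = 0 by omega, pvHit]
    · -- an occurrence exists; r = its index
      have hspec := PySem.Chars.findFrom_natCast_spec l t start hstart (by rw [← hff]; exact hneg)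
      obtain ⟨hge, hpre, hmin⟩ := hspec
      rw [hff]
      set r := (PySem.Chars.findFrom l t (start : Int)).toNat with hr
      have hrge : start ≤ r := by omega
      have hrle : r ≤ l.length := by
        by_contra h
        have hd : l.drop r = [] := List.drop_eq_nil_of_le (by omega)
        have ht0 : t = [] := List.prefix_nil.mp (hd ▸ hpre)
        have : ¬ t <+: l.drop start := hmin start le_rfl (by omega)
        exact this (ht0 ▸ List.nil_prefix)
      have hnonneg : (0:Int) ≤ PySem.Chars.findFrom l t (start : Int) := by
        by_contra h
        push Not at h
        omega
      have hEqNeg : (PySem.Chars.findFrom l t (start : Int) == -1) = false := by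
        simp only [beq_eq_false_iff_ne, ne_eq]
        intro hcontra
        rw [hff] at hneg
        exact hneg hcontra
      rw [hEqNeg]
      simp only [Bool.false_eq_true, if_false]
      have hskip : pvHit l t start (l.length - start) = pvHit l t r (l.length - r) := by
        have := pvHit_skip l t (r - start) start (by omega) (fun j hj1 hj2 => by
          by_contra h
          have hmt : pvMatch l t j = true := by
            cases hb : pvMatch l t j
            · exact absurd hb h
            · rfl
          exact hmin j hj1 (by omega) ((pvMatch_iff l t j).mp hmt))
        rw [this]
        congr 1 <;> omega
      rw [hskip]
      have hIlt : decide (PySem.Chars.findFrom l t (start : Int) < (l.length : Int))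
          = decide (r < l.length) := by
        simp only [decide_eq_decide]
        omega
      by_cases hrn : r < l.length
      · -- in range: hit iff cond at r, else continue
        have hhit : pvHit l t r (l.length - r)
            = (pvCond l t r || pvHit l t (r+1) (l.length - (r+1))) := by
          have : l.length - r = (l.length - (r+1)) + 1 := by omega
          rw [this]; rfl
        have hcondr : pvCond l t r
            = ((pvMask l false none).getD r false && !pvIsQuote (l.getD r ' ')) := by
          unfold pvCond
          rw [hmask r hrn, (pvMatch_iff l t r).mpr hpre]
          cases (pvSt l r).1 <;> cases pvIsQuote (l.getD r ' ') <;> simp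
        rw [hhit, hcondr]
        rw [hIlt, decide_eq_true hrn, Bool.true_and]
        by_cases hc : ((pvMask l false none).getD r false && !pvIsQuote (l.getD r ' ')) = true
        · rw [if_pos hc, hc]; simp
        · rw [if_neg (fun h => hc h)]
          rw [(by cases hb : ((pvMask l false none).getD r false && !pvIsQuote (l.getD r ' '))
                  · rfl
                  · exact absurd hb hc :
              ((pvMask l false none).getD r false && !pvIsQuote (l.getD r ' ')) = false)]
          rw [Bool.false_or]
          exact ih (r+1) (by omega) (by omega)
      · -- r = length: no hit here, and the loop terminates on the next round
        have hreq : r = l.length := by omega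
        rw [hIlt, decide_eq_false hrn]
        simp only [Bool.false_and, Bool.false_eq_true, if_false]
        have hout : pvBLoop line text (pvMask l false none) f (r+1) = false :=
          pvBLoop_out line text _ f (r+1) (by rw [← hl]; omega)
        rw [hout]
        rw [hreq]
        simp [pvHit]

-- ===== VERDICT (by name: the statement is the Claim_ definition above) =====
theorem is_in_string_or_comment_py_spec : Claim_equal_is_in_string_or_comment_py := by
  unfold Claim_equal_is_in_string_or_comment_py
  intro line text _
  unfold Spec_is_in_string_or_comment_py
  unfold is_in_string_or_comment_py is_in_string_or_comment_py_alt
  simp only []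
  by_cases h : (PySem.Str.find line "#" != -1 && decide (PySem.Str.find line text > PySem.Str.find line "#")) = true
  · rw [if_pos h, if_pos h]
  · rw [if_neg h, if_neg h]
    rw [pvALoop_eq line.toList text.toList line.toList 0 false none (by simp) (by simp [pvSt])]
    rw [pvBLoop_eq line text (line.toList.length + 2) 0 (by omega) (by omega)]
    simp
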